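-- pv_equiv track=rewrite | github.com/tradler-az/kareem_bot | bosco_os/agents/security_agent.py | _generate_threat_recommendations
-- ===== SOURCE A (Python) =====
-- from typing import Dict, List, Any, Optional
--
-- def _generate_threat_recommendations(threats: List[Dict]) -> List[str]:
--     """Generate recommendations based on detected threats"""
--     recommendations = []
--
--     for threat in threats:
--         threat_type = threat.get("type", "")
--
--         if threat_type == "brute_force":
--             recommendations.append("Enable fail2ban or similar intrusion prevention")
--             recommendations.append("Implement rate limiting on login endpoints")
--             recommendations.append("Use strong, unique passwords")
--
--         elif threat_type == "suspicious_process":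
--             recommendations.append("Investigate suspicious processes immediately")
--             recommendations.append("Check if authorized security testing")
--
--     if not recommendations:
--         recommendations.append("Continue monitoring for suspicious activity")
--
--     return recommendations
-- ===== SOURCE B (Python) =====
-- _RECS = {
--     "brute_force": [
--         "Enable fail2ban or similar intrusion prevention",
--         "Implement rate limiting on login endpoints",
--         "Use strong, unique passwords",
--     ],
--     "suspicious_process": [
--         "Investigate suspicious processes immediately",
--         "Check if authorized security testing",
--     ],
-- }
--
-- def _collect(threats, i):
--     """Recursively concatenate the table row for each threat (no loop, no accumulator)."""
--     if i == len(threats):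
--         return []
--     return _RECS.get(threats[i].get("type", ""), []) + _collect(threats, i + 1)
--
-- def _generate_threat_recommendations(threats):
--     return _collect(threats, 0) or ["Continue monitoring for suspicious activity"]
-- ===== Notes on version B (the rewrite author's own statement) =====
-- stated objective: alternative
-- what changed: Replaces A's imperative loop with an if/elif chain appending to an accumulator by a recursive, table-driven function that builds the result back-to-front via right-concatenation of looked-up rows, with 'or' supplying the monitoring default.
import Mathlib
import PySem

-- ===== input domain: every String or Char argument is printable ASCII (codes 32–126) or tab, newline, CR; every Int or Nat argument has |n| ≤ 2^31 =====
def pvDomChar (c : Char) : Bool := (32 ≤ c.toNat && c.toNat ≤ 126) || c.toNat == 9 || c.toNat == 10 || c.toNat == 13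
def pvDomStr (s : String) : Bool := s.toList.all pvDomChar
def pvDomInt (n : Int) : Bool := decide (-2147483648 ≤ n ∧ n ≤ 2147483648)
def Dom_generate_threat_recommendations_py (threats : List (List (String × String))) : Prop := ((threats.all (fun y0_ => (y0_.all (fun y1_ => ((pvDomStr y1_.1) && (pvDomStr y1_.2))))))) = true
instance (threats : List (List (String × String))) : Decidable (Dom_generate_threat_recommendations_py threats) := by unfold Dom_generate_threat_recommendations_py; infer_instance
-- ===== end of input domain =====

-- B replaces A's accumulator loop + if/elif chain with a recursive table-driven concatenation (alternative decomposition; same cost).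


-- ===== PORT A =====
def generate_threat_recommendations_py (threats : List (List (String × String))) : List String :=
  let recommendations := threats.foldl (fun recommendations threat =>
    let threat_type := ((threat.lookup "type").getD "")
    if threat_type == "brute_force" then
      ((recommendations ++ ["Enable fail2ban or similar intrusion prevention"])
        ++ ["Implement rate limiting on login endpoints"])
        ++ ["Use strong, unique passwords"]
    else if threat_type == "suspicious_process" then
      (recommendations ++ ["Investigate suspicious processes immediately"])
        ++ ["Check if authorized security testing"]
    else recommendations) []
  if recommendations.isEmpty then
    recommendations ++ ["Continue monitoring for suspicious activity"]
  else recommendations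

-- ===== PORT B =====
def pvRecs : List (String × List String) :=
  [("brute_force",
    ["Enable fail2ban or similar intrusion prevention",
     "Implement rate limiting on login endpoints",
     "Use strong, unique passwords"]),
   ("suspicious_process",
    ["Investigate suspicious processes immediately",
     "Check if authorized security testing"])]

-- Source B's _collect: index recursion over the list, rendered as structural recursion.
def pvCollect : List (List (String × String)) → List String
  | [] => []
  | threat :: rest =>
      ((pvRecs.lookup ((threat.lookup "type").getD "")).getD []) ++ pvCollect rest

def generate_threat_recommendations_py_alt (threats : List (List (String × String))) : List String :=
  let r := pvCollect threats
  if r.isEmpty then ["Continue monitoring for suspicious activity"] else r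

-- ===== PRECONDITION & SPEC =====
def Spec_generate_threat_recommendations_py (threats : List (List (String × String))) (out : List String) : Prop := out = generate_threat_recommendations_py_alt threats
instance (threats : List (List (String × String))) (out : List String) : Decidable (Spec_generate_threat_recommendations_py threats out) := by unfold Spec_generate_threat_recommendations_py; infer_instance

-- ===== CLAIM (what is proved, stated in full; the proofs are below) =====
def Claim_equal_generate_threat_recommendations_py : Prop := ∀ (threats : List (List (String × String))), Dom_generate_threat_recommendations_py threats → Spec_generate_threat_recommendations_py threats (generate_threat_recommendations_py threats)

-- ===== LEMMAS AND PROOFS =====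

-- B's table row, characterised per key.
theorem pvRecs_getD (k : String) : ((pvRecs.lookup k).getD []) =
    if k = "brute_force" then
      ["Enable fail2ban or similar intrusion prevention",
       "Implement rate limiting on login endpoints",
       "Use strong, unique passwords"]
    else if k = "suspicious_process" then
      ["Investigate suspicious processes immediately",
       "Check if authorized security testing"]
    else [] := by
  by_cases h1 : k = "brute_force"
  · subst h1; decide
  · by_cases h2 : k = "suspicious_process"
    · subst h2; decide
    · have b1 : (k == "brute_force") = false := beq_eq_false_iff_ne.mpr h1
      have b2 : (k == "suspicious_process") = false := beq_eq_false_iff_ne.mpr h2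
      simp [pvRecs, List.lookup, b1, b2, h1, h2]

-- A's fold appends, per threat, exactly B's recursive concatenation.
theorem pvFold_eq_collect (threats : List (List (String × String))) (acc : List String) :
    threats.foldl (fun recommendations threat =>
      let threat_type := ((threat.lookup "type").getD "")
      if threat_type == "brute_force" then
        ((recommendations ++ ["Enable fail2ban or similar intrusion prevention"])
          ++ ["Implement rate limiting on login endpoints"])
          ++ ["Use strong, unique passwords"]
      else if threat_type == "suspicious_process" then
        (recommendations ++ ["Investigate suspicious processes immediately"])
          ++ ["Check if authorized security testing"]
      else recommendations) acc
    = acc ++ pvCollect threats := by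
  induction threats generalizing acc with
  | nil => simp [pvCollect]
  | cons t ts ih =>
    simp only [List.foldl_cons, pvCollect]
    rw [ih, pvRecs_getD]
    by_cases h1 : ((t.lookup "type").getD "") = "brute_force"
    · simp [h1]
    · by_cases h2 : ((t.lookup "type").getD "") = "suspicious_process"
      · simp [h1, h2]
      · simp [h1, h2]

-- ===== VERDICT (by name: the statement is the Claim_ definition above) =====
theorem generate_threat_recommendations_py_spec : Claim_equal_generate_threat_recommendations_py := by
  intro threats _
  unfold Spec_generate_threat_recommendations_py
  unfold generate_threat_recommendations_py generate_threat_recommendations_py_alt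
  simp only [pvFold_eq_collect, List.nil_append]
  split_ifs with h
  · rw [List.isEmpty_iff.mp h]; rfl
  · rfl
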